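-- pv_equiv track=rewrite | github.com/jnomar/mandarin_word_list_generator | src/main.py | get_refold_word_info
-- ===== SOURCE A (Python) =====
-- def get_refold_word_info(w):
--     w = w.split('\t')
--     output = ""
--
--     li = [3, 4, 5, 6, 7, 9, 10, 11, 12 ,13 ,14 ,15 ,16]
--
--     for i in range(3, len(w)):
--         if i in li:
--             output += "{}\t".format(w[i])
--
--     return "{}\n".format(output.strip())
-- ===== SOURCE B (Python) =====
-- def get_refold_word_info(w):
--     fields = w.split('\t')
--     selected = fields[3:8] + fields[9:17]
--     return "{}\n".format("\t".join(selected).strip())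
-- ===== Notes on version B (the rewrite author's own statement) =====
-- stated objective: simpler
-- what changed: Replaces the range(3,len)+membership-list loop that appends each selected column with a trailing tab by direct slicing of the two contiguous column ranges (3:8 and 9:17) and a single tab-join; join-then-strip reproduces build-then-strip exactly.
import Mathlib
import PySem

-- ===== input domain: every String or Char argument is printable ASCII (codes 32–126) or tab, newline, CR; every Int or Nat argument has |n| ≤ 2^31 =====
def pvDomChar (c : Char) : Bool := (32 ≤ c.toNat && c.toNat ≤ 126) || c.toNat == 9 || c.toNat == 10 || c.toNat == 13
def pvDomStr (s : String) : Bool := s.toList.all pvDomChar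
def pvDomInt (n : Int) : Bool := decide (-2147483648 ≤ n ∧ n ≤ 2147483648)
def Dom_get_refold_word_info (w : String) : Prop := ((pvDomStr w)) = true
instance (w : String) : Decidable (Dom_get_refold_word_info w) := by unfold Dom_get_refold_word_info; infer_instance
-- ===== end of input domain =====

-- B replaces A's range(3,len) loop with its membership-list filter by slicing the two
-- contiguous column ranges (3:8 and 9:17) and a single tab-join (objective: simpler).
-- ===== PORT A =====
def pvLi : List Int := [3, 4, 5, 6, 7, 9, 10, 11, 12, 13, 14, 15, 16]

def get_refold_word_info (w : String) : String :=
  let ws : List (List Char) := PySem.Chars.splitOn w.toList ['\t']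
  let output : List Char :=
    (PySem.List.pyRange 3 (ws.length : Int)).foldl
      (fun acc i => if i ∈ pvLi then acc ++ PySem.List.pyGetD ws i [] ++ ['\t'] else acc) []
  String.ofList (PySem.Chars.strip output ++ ['\n'])

-- ===== PORT B =====
def get_refold_word_info_alt (w : String) : String :=
  let fields : List (List Char) := PySem.Chars.splitOn w.toList ['\t']
  let selected : List (List Char) :=
    PySem.List.slice fields (some 3) (some 8) ++ PySem.List.slice fields (some 9) (some 17)
  String.ofList (PySem.Chars.strip (PySem.Chars.join ['\t'] selected) ++ ['\n'])

-- ===== PRECONDITION & SPEC =====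
def Spec_get_refold_word_info (w : String) (out : String) : Prop := out = get_refold_word_info_alt w
instance (w : String) (out : String) : Decidable (Spec_get_refold_word_info w out) := by unfold Spec_get_refold_word_info; infer_instance

-- ===== CLAIM (what is proved, stated in full; the proofs are below) =====
def Claim_equal_get_refold_word_info : Prop := ∀ (w : String), Dom_get_refold_word_info w → Spec_get_refold_word_info w (get_refold_word_info w)

-- ===== LEMMAS AND PROOFS =====
def pvH (ws : List (List Char)) (i : Int) : List Char :=
  if i ∈ pvLi then PySem.List.pyGetD ws i [] ++ ['\t'] else []

-- strip swallows a trailing tab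
theorem pv_strip_tab (x : List Char) :
    PySem.Chars.strip (x ++ ['\t']) = PySem.Chars.strip x := by
  simp only [PySem.Chars.strip, PySem.Chars.lstrip, PySem.Chars.rstrip, List.dropWhile_append]
  have ht : PySem.Chars.isspace '\t' = true := by decide
  by_cases h : (List.dropWhile PySem.Chars.isspace x).isEmpty = true
  · rw [List.isEmpty_iff] at h
    simp [h, ht]
  · simp [h, ht]

-- flatMap with trailing tabs = join ++ tab on a nonempty list
theorem pv_flatMap_join (s : List Char) (l : List (List Char)) :
    List.flatMap (fun c => c ++ ['\t']) (s :: l)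
      = PySem.Chars.join ['\t'] (s :: l) ++ ['\t'] := by
  induction l generalizing s with
  | nil => simp [PySem.Chars.join_singleton]
  | cons r rs ih => simp [PySem.Chars.join_cons_cons, ih r]

theorem pv_strip_flatMap (sel : List (List Char)) :
    PySem.Chars.strip (List.flatMap (fun c => c ++ ['\t']) sel)
      = PySem.Chars.strip (PySem.Chars.join ['\t'] sel) := by
  cases sel with
  | nil => simp [PySem.Chars.join, List.intercalate]
  | cons s l => rw [pv_flatMap_join, pv_strip_tab]

theorem pv_nilseg (ws : List (List Char)) (a b : Int)
    (h : ∀ i : Int, a ≤ i → i < b → i ∉ pvLi) :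
    List.flatMap (pvH ws) (PySem.List.pyRange a b) = [] := by
  rw [List.flatMap_eq_nil_iff]
  intro x hx
  rw [PySem.List.mem_pyRange_one] at hx
  simp [pvH, h x hx.1 hx.2]

theorem pv_seg (ws : List (List Char)) : ∀ (k : Nat) (a b : Int), 0 ≤ a →
    b ≤ ws.length → (b - a).toNat = k →
    (∀ i : Int, a ≤ i → i < b → i ∈ pvLi) →
    List.flatMap (pvH ws) (PySem.List.pyRange a b)
      = List.flatMap (fun c => c ++ ['\t']) ((ws.drop a.toNat).take (b - a).toNat) := by
  intro k
  induction k with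
  | zero =>
    intro a b ha hb hk _
    rw [PySem.List.pyRange_one_eq_nil (by omega), hk]
    simp
  | succ k ih =>
    intro a b ha hb hk hli
    have hab : a < b := by omega
    rw [PySem.List.pyRange_one_cons hab]
    have halen : a.toNat < ws.length := by omega
    rw [List.drop_eq_getElem_cons halen]
    have htake : (b - a).toNat = ((b - (a+1)).toNat) + 1 := by omega
    rw [htake, List.take_succ_cons]
    simp only [List.flatMap_cons]
    rw [pvH, if_pos (hli a le_rfl hab),
      PySem.List.pyGetD_eq_getElem ws [] ha (by omega)]
    have : a.toNat + 1 = (a+1).toNat := by omega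
    rw [this]
    rw [ih (a+1) b (by omega) hb (by omega) (fun i h1 h2 => hli i (by omega) h2)]


theorem pv_core (ws : List (List Char)) :
    PySem.Chars.strip
      ((PySem.List.pyRange 3 (ws.length : Int)).foldl
        (fun acc i => if i ∈ pvLi then acc ++ PySem.List.pyGetD ws i [] ++ ['\t'] else acc) [])
    = PySem.Chars.strip (PySem.Chars.join ['\t']
        (PySem.List.slice ws (some 3) (some 8) ++ PySem.List.slice ws (some 9) (some 17))) := by
  have hbody : (fun (acc : List Char) (i : Int) =>
      if i ∈ pvLi then acc ++ PySem.List.pyGetD ws i [] ++ ['\t'] else acc)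
      = fun acc i => acc ++ pvH ws i := by
    funext acc i
    by_cases h : i ∈ pvLi <;> simp [pvH, h]
  rw [hbody, PySem.List.foldl_append_eq_flatMap, List.nil_append]
  rw [PySem.List.slice_toNat ws (by norm_num) (by norm_num),
      PySem.List.slice_toNat ws (by norm_num) (by norm_num)]
  simp only [show Int.toNat 3 = 3 from rfl, show Int.toNat 8 = 8 from rfl,
    show Int.toNat 9 = 9 from rfl, show Int.toNat 17 = 17 from rfl]
  by_cases hn : (ws.length : Int) ≤ 3
  · rw [PySem.List.pyRange_one_eq_nil hn]
    have h3 : ws.drop 3 = [] := by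
      apply List.drop_eq_nil_of_le; omega
    have h9 : ws.drop 9 = [] := by
      apply List.drop_eq_nil_of_le; omega
    simp [h3, h9]
  · push Not at hn
    set n : Int := (ws.length : Int) with hndef
    have hr : PySem.List.pyRange 3 n = PySem.List.pyRange 3 (min 8 n)
        ++ PySem.List.pyRange (min 8 n) (min 9 n)
        ++ PySem.List.pyRange (min 9 n) (min 17 n)
        ++ PySem.List.pyRange (min 17 n) n := by
      rw [PySem.List.pyRange_one_append 3 (min 8 n) n (by omega) (by omega),
        PySem.List.pyRange_one_append (min 8 n) (min 9 n) n (by omega) (by omega),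
        PySem.List.pyRange_one_append (min 9 n) (min 17 n) n (by omega) (by omega)]
      simp [List.append_assoc]
    rw [hr]
    simp only [List.flatMap_append]
    rw [pv_nilseg ws (min 8 n) (min 9 n) (by intro i h1 h2; simp [pvLi]; omega)]
    rw [pv_nilseg ws (min 17 n) n (by intro i h1 h2; simp [pvLi]; omega)]
    rw [pv_seg ws (min 8 n - 3).toNat 3 (min 8 n) (by norm_num) (by omega) rfl
      (by intro i h1 h2; simp [pvLi]; omega)]
    rw [pv_seg ws (min 17 n - min 9 n).toNat (min 9 n) (min 17 n) (by omega) (by omega) rfl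
      (by intro i h1 h2; simp [pvLi]; omega)]
    rw [List.append_nil, List.append_nil]
    rw [← List.flatMap_append, pv_strip_flatMap]
    simp only [show Int.toNat 3 = 3 from rfl]
    congr 2
    by_cases h9 : 9 ≤ n
    · have hmin9 : (min 9 n).toNat = 9 := by omega
      rw [hmin9]
      congr 1
      · rw [List.take_eq_take_iff]
        simp; omega
      · rw [List.take_eq_take_iff]
        simp; omega
    · have hd9 : ws.drop 9 = [] := List.drop_eq_nil_of_le (by omega)
      have hdn : ws.drop (min 9 n).toNat = [] := List.drop_eq_nil_of_le (by omega)
      rw [hd9, hdn]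
      simp only [List.take_nil, List.append_nil]
      rw [List.take_eq_take_iff]
      simp; omega

-- ===== VERDICT (by name: the statement is the Claim_ definition above) =====
theorem get_refold_word_info_spec : Claim_equal_get_refold_word_info := by
  intro w _
  show get_refold_word_info w = get_refold_word_info_alt w
  simp only [get_refold_word_info, get_refold_word_info_alt]
  rw [pv_core (PySem.Chars.splitOn w.toList ['\t'])]
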